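-- pv_equiv track=rewrite | github.com/OshriNap/evolution-agent | examples/optimize_image.py | _count_shapes
-- ===== SOURCE A (Python) =====
-- def _count_shapes(svg_string: str) -> int:
--     """Count SVG shape elements (rough heuristic)."""
--     shape_tags = ["<circle", "<rect", "<ellipse", "<line", "<polygon",
--                   "<polyline", "<path", "<text"]
--     count = 0
--     s = svg_string.lower()
--     for tag in shape_tags:
--         count += s.count(tag)
--     return max(1, count)  # at least 1
-- ===== SOURCE B (Python) =====
-- def _count_shapes(svg_string: str) -> int:
--     """Count SVG shape elements in one left-to-right pass (rough heuristic)."""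
--     tags = ["<circle", "<rect", "<ellipse", "<line", "<polygon",
--             "<polyline", "<path", "<text"]
--     s = svg_string.lower()
--     count = 0
--     i = 0
--     n = len(s)
--     while i < n:
--         if s[i] == '<':
--             for tag in tags:
--                 if s.startswith(tag, i):
--                     count += 1
--                     i += len(tag)
--                     break
--             else:
--                 i += 1
--         else:
--             i += 1
--     return max(1, count)
-- ===== Notes on version B (the rewrite author's own statement) =====
-- stated objective: alternative
-- what changed: B makes a single left-to-right pass that matches the first shape tag starting at each position and skips past it, instead of A's eight separate full-string .count scans over the lowered string.
import Mathlib
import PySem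

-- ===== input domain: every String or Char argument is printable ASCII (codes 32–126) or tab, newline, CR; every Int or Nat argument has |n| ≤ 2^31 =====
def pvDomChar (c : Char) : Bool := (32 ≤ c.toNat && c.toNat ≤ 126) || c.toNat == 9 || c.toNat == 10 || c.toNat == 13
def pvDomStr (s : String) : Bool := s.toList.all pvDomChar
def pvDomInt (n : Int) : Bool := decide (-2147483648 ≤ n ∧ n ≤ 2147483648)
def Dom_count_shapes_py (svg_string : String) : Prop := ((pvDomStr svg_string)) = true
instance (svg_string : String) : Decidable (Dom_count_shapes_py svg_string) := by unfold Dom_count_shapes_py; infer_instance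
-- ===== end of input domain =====

-- B replaces A's eight separate full-string .count scans by one left-to-right scan that
-- matches the first tag at each '<' and skips past it (objective: alternative; not faster).

-- ===== PORT A =====
-- literal transliteration of A: lower the string, add s.count(tag) for each tag, max(1, count)
def count_shapes_py (svg_string : String) : Int :=
  let shape_tags : List String := ["<circle", "<rect", "<ellipse", "<line", "<polygon",
                                   "<polyline", "<path", "<text"]
  let s := PySem.Str.lower svg_string
  let count := shape_tags.foldl (fun count tag => count + (PySem.Str.count s tag : Int)) 0
  max 1 count

-- ===== PORT B =====
def pvShapeTags : List (List Char) :=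
  ["<circle".toList, "<rect".toList, "<ellipse".toList, "<line".toList, "<polygon".toList,
   "<polyline".toList, "<path".toList, "<text".toList]

-- B's while loop over indices, as recursion over the character list: at each '<' try the
-- tags in order; on the first match count 1 and skip past the tag, else advance one char.
def pvScanB (tags : List (List Char)) : List Char → Int
  | [] => 0
  | c :: t =>
    if c = '<' then
      match tags.find? (fun tag => tag.isPrefixOf (c :: t)) with
      | some tag => pvScanB tags (t.drop (tag.length - 1)) + 1
      | none => pvScanB tags t
    else pvScanB tags t
termination_by l => l.length
decreasing_by
  all_goals simp only [List.length_drop, List.length_cons]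
  all_goals omega

def count_shapes_py_alt (svg_string : String) : Int :=
  let s := PySem.Str.lower svg_string
  max 1 (pvScanB pvShapeTags s.toList)

-- ===== PRECONDITION & SPEC =====
def Spec_count_shapes_py (svg_string : String) (out : Int) : Prop := out = count_shapes_py_alt svg_string
instance (svg_string : String) (out : Int) : Decidable (Spec_count_shapes_py svg_string out) := by unfold Spec_count_shapes_py; infer_instance

-- ===== CLAIM (what is proved, stated in full; the proofs are below) =====
def Claim_equal_count_shapes_py : Prop := ∀ (svg_string : String), Dom_count_shapes_py svg_string → Spec_count_shapes_py svg_string (count_shapes_py svg_string)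

-- ===== LEMMAS AND PROOFS =====

-- non-overlapping occurrence count, stepping exactly like Python's str.count
def pvCountOcc (sub : List Char) : List Char → Nat
  | [] => 0
  | c :: t =>
    if sub.isPrefixOf (c :: t) then pvCountOcc sub (t.drop (sub.length - 1)) + 1
    else pvCountOcc sub t
termination_by l => l.length
decreasing_by
  all_goals simp only [List.length_drop, List.length_cons]
  all_goals omega

theorem pvGo_eq_countOcc (sub : List Char) (hsub : sub ≠ []) :
    ∀ (fuel : Nat) (l : List Char) (acc : Nat), l.length ≤ fuel →
      PySem.Chars.count.go sub fuel l acc = acc + pvCountOcc sub l := by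
  intro fuel
  induction fuel with
  | zero =>
    intro l acc hl
    have : l = [] := List.eq_nil_of_length_eq_zero (Nat.le_zero.mp hl)
    subst this
    simp [PySem.Chars.count.go, pvCountOcc]
  | succ n ih =>
    intro l acc hl
    cases l with
    | nil => simp [PySem.Chars.count.go, pvCountOcc]
    | cons c t =>
      obtain ⟨d, ds, rfl⟩ : ∃ d ds, sub = d :: ds := by
        cases sub with
        | nil => exact absurd rfl hsub
        | cons d ds => exact ⟨d, ds, rfl⟩
      rw [PySem.Chars.count.go]
      by_cases hp : (d :: ds).isPrefixOf (c :: t) = true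
      · simp only [hp, if_true]
        rw [show (d :: ds).length = ds.length + 1 from rfl, List.drop_succ_cons]
        have hlen : (t.drop ds.length).length ≤ n := by
          simp only [List.length_drop]
          simp only [List.length_cons] at hl
          omega
        rw [ih (t.drop ds.length) (acc + 1) hlen]
        rw [pvCountOcc]
        simp [hp]
        omega
      · simp only [hp]
        have hlen : t.length ≤ n := by simp only [List.length_cons] at hl; omega
        rw [ih t acc hlen]
        rw [pvCountOcc]
        simp [hp]

theorem pvCount_eq_countOcc (sub l : List Char) (hsub : sub ≠ []) :
    PySem.Chars.count l sub = pvCountOcc sub l := by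
  rw [PySem.Chars.count]
  have : sub.isEmpty = false := by simp [hsub]
  rw [this]
  simpa using pvGo_eq_countOcc sub hsub l.length l 0 le_rfl

-- stepping past positions where sub does not match does not change the count
theorem pvCountOcc_drop (sub : List Char) :
    ∀ (k : Nat) (l : List Char), (∀ i < k, ¬ sub.isPrefixOf (l.drop i) = true) →
      pvCountOcc sub l = pvCountOcc sub (l.drop k) := by
  intro k
  induction k with
  | zero => intro l _; simp
  | succ n ih =>
    intro l h
    cases l with
    | nil => simp
    | cons c t =>
      have h0 : ¬ sub.isPrefixOf (c :: t) = true := by simpa using h 0 (Nat.succ_pos n)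
      rw [pvCountOcc]
      simp only [h0]
      rw [List.drop_succ_cons]
      exact ih t (fun i hi => by simpa using h (i + 1) (by omega))

-- facts about the literal tag list, checked by the kernel
theorem pvTags_head : ∀ u ∈ pvShapeTags, ∀ i < u.length, (u[i]? = some '<' ↔ i = 0) := by decide
theorem pvTags_nonnil : ∀ u ∈ pvShapeTags, u ≠ [] := by decide
theorem pvTags_noprefix : ∀ u ∈ pvShapeTags, ∀ v ∈ pvShapeTags, u.isPrefixOf v = true → u = v := by
  decide
theorem pvTags_countP : ∀ u ∈ pvShapeTags, pvShapeTags.countP (fun v => v == u) = 1 := by decide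

theorem pvScan_eq_sum : ∀ (l : List Char),
    pvScanB pvShapeTags l = (pvShapeTags.map (fun u => (pvCountOcc u l : Int))).sum := by
  intro l
  induction hn : l.length using Nat.strong_induction_on generalizing l with
  | _ n IH =>
  cases l with
  | nil => simp [pvScanB, pvCountOcc]
  | cons c t =>
    subst hn
    by_cases hc : c = '<'
    · rw [pvScanB]
      simp only [hc, if_true]
      cases hfind : pvShapeTags.find? (fun tag => tag.isPrefixOf ('<' :: t)) with
      | none =>
        have hnone := List.find?_eq_none.mp hfind
        show pvScanB pvShapeTags t = _
        rw [IH t.length (by simp) t rfl]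
        congr 1
        apply List.map_congr_left
        intro u hu
        have : ¬ u.isPrefixOf ('<' :: t) = true := by simpa using hnone u hu
        rw [pvCountOcc]
        simp [this]
      | some tag0 =>
        have hmem := List.mem_of_find?_eq_some hfind
        have hpref : tag0.isPrefixOf ('<' :: t) = true := by
          simpa using List.find?_some hfind
        have hne := pvTags_nonnil tag0 hmem
        show pvScanB pvShapeTags (t.drop (tag0.length - 1)) + 1 = _
        -- per-tag: count on l splits into the match indicator plus count past the match
        have hstep : ∀ u ∈ pvShapeTags,
            (pvCountOcc u ('<' :: t) : Int) =
              (if u == tag0 then 1 else 0) + (pvCountOcc u (t.drop (tag0.length - 1)) : Int) := by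
          intro u hu
          by_cases heq : u = tag0
          · subst heq
            have hp' : u <+: '<' :: t := List.isPrefixOf_iff_prefix.mp hpref
            rw [pvCountOcc]
            simp [hp']
            omega
          · have hne' : ¬ u.isPrefixOf ('<' :: t) = true := by
              intro h
              rcases List.prefix_or_prefix_of_prefix (List.isPrefixOf_iff_prefix.mp h)
                  (List.isPrefixOf_iff_prefix.mp hpref) with h1 | h1
              · exact heq (pvTags_noprefix u hu tag0 hmem (List.isPrefixOf_iff_prefix.mpr h1))
              · exact heq (pvTags_noprefix tag0 hmem u hu (List.isPrefixOf_iff_prefix.mpr h1)).symm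
            have hdrop : pvCountOcc u ('<' :: t) = pvCountOcc u (t.drop (tag0.length - 1)) := by
              have := pvCountOcc_drop u tag0.length ('<' :: t) ?_
              · rw [this]
                obtain ⟨d, ds, rfl⟩ : ∃ d ds, tag0 = d :: ds := by
                  cases tag0 with
                  | nil => exact absurd rfl hne
                  | cons d ds => exact ⟨d, ds, rfl⟩
                simp [List.drop_succ_cons]
              · intro i hi hp
                rcases Nat.eq_zero_or_pos i with rfl | hpos
                · exact hne' (by simpa using hp)
                · -- u starts with '<' but tag0 has no '<' after position 0
                  have hu0 : u[0]? = some '<' := by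
                    have hul : 0 < u.length := by
                      cases u with
                      | nil => exact absurd rfl (pvTags_nonnil [] hu)
                      | cons _ _ => simp
                    exact (pvTags_head u hu 0 hul).mpr rfl
                  have hupre := List.isPrefixOf_iff_prefix.mp hp
                  have h1 : (('<' :: t).drop i)[0]? = some '<' := by
                    obtain ⟨r, hr⟩ := hupre
                    rw [← hr, List.getElem?_append_left (by
                      cases u with
                      | nil => exact absurd rfl (pvTags_nonnil [] hu)
                      | cons _ _ => simp)]
                    exact hu0
                  have h2 : ('<' :: t)[i]? = some '<' := by
                    rw [List.getElem?_drop] at h1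
                    simpa using h1
                  have h3 : ('<' :: t)[i]? = tag0[i]? := by
                    obtain ⟨r, hr⟩ := List.isPrefixOf_iff_prefix.mp hpref
                    rw [← hr, List.getElem?_append_left hi]
                  have : tag0[i]? = some '<' := h3 ▸ h2
                  have := (pvTags_head tag0 hmem i hi).mp this
                  omega
            rw [hdrop]
            simp [heq]
        have hlen : (t.drop (tag0.length - 1)).length < ('<' :: t).length := by
          simp only [List.length_drop, List.length_cons]
          omega
        rw [IH _ hlen _ rfl]
        rw [List.map_congr_left hstep, PySem.List.sum_map_add_int]
        have : (pvShapeTags.map (fun u => if u == tag0 then (1 : Int) else 0)).sum = 1 := by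
          rw [PySem.List.sum_map_ite_one_zero (fun v => v == tag0) pvShapeTags]
          rw [pvTags_countP tag0 hmem]
          rfl
        rw [this]
        omega
    · rw [pvScanB]
      simp only [hc, if_false]
      rw [IH t.length (by simp) t rfl]
      congr 1
      apply List.map_congr_left
      intro u hu
      have hne' : ¬ u.isPrefixOf (c :: t) = true := by
        intro h
        have hu0 : u[0]? = some '<' := by
          have hul : 0 < u.length := by
            cases u with
            | nil => exact absurd rfl (pvTags_nonnil [] hu)
            | cons _ _ => simp
          exact (pvTags_head u hu 0 hul).mpr rfl
        obtain ⟨r, hr⟩ := List.isPrefixOf_iff_prefix.mp h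
        have : (c :: t)[0]? = some '<' := by
          rw [← hr, List.getElem?_append_left (by
            cases u with
            | nil => exact absurd rfl (pvTags_nonnil [] hu)
            | cons _ _ => simp)]
          exact hu0
        simp at this
        exact hc this
      rw [pvCountOcc]
      simp [hne']

-- ===== VERDICT (by name: the statement is the Claim_ definition above) =====
theorem count_shapes_py_spec : Claim_equal_count_shapes_py := by
  intro svg_string _
  unfold Spec_count_shapes_py count_shapes_py count_shapes_py_alt
  simp only [List.foldl]
  rw [pvScan_eq_sum]
  simp only [pvShapeTags, List.map, List.sum_cons, List.sum_nil]
  simp only [PySem.Str.count_eq, PySem.Str.toList_lower]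
  rw [pvCount_eq_countOcc _ _ (by decide), pvCount_eq_countOcc _ _ (by decide),
      pvCount_eq_countOcc _ _ (by decide), pvCount_eq_countOcc _ _ (by decide),
      pvCount_eq_countOcc _ _ (by decide), pvCount_eq_countOcc _ _ (by decide),
      pvCount_eq_countOcc _ _ (by decide), pvCount_eq_countOcc _ _ (by decide)]
  push_cast
  ring_nf
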